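-- pv_equiv track=rewrite | github.com/LaetitiaGrvd/medconnect | backend/app/routes/doctors.py | _parse_days
-- ===== SOURCE A (Python) =====
-- VALID_DAYS = {"mon", "tue", "wed", "thu", "fri", "sat", "sun"}
--
-- def _parse_days(value, required: bool):
--     if value is None:
--         if required:
--             return None, "availability_days is required"
--         return None, None
--     if not isinstance(value, list):
--         return None, "availability_days must be an array of day keys"
--     normalized = []
--     seen = set()
--     for item in value:
--         day = str(item or "").strip().lower()
--         if not day:
--             continue
--         if day not in VALID_DAYS:
--             return None, f"Invalid availability_days value: '{day}'"
--         if day not in seen: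
--             normalized.append(day)
--             seen.add(day)
--     return normalized, None
-- ===== SOURCE B (Python) =====
-- VALID_DAYS = {"mon", "tue", "wed", "thu", "fri", "sat", "sun"}
--
-- def _nub_validate(days):
--     # validate head, then recurse on the rest with every copy of the head removed:
--     # dedup by shrinking the remaining list (no seen-set).
--     if not days:
--         return [], None
--     d = days[0]
--     if d not in VALID_DAYS:
--         return None, f"Invalid availability_days value: '{d}'"
--     tail, err = _nub_validate([x for x in days[1:] if x != d])
--     if err is not None:
--         return None, err
--     return [d] + tail, None
--
-- def _parse_days(value, required: bool):
--     if value is None: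
--         if required:
--             return None, "availability_days is required"
--         return None, None
--     if not isinstance(value, list):
--         return None, "availability_days must be an array of day keys"
--     days = [d for d in (str(x or "").strip().lower() for x in value) if d]
--     return _nub_validate(days)
-- ===== Notes on version B (the rewrite author's own statement) =====
-- stated objective: alternative
-- what changed: Replaces A's fused loop with a seen-set accumulator by a recursive nub-by-filter: validate the first remaining day, then recurse on the rest with all copies of that day filtered out, so deduplication happens by shrinking the remaining list and no seen-set or dict exists.
import Mathlib
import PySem

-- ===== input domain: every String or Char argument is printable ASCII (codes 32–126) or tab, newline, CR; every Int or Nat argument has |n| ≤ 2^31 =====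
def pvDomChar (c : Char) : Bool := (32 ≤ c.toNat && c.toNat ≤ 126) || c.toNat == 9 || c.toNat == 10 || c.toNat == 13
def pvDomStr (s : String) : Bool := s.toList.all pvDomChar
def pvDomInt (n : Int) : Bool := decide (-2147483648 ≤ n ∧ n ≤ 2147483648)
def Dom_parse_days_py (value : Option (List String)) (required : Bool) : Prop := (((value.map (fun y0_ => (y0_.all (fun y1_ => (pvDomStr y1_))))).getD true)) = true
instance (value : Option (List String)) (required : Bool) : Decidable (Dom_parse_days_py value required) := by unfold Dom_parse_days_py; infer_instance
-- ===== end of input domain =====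

-- B replaces A's fused seen-set loop by a recursive nub-by-filter (validate head, recurse on the
-- rest with copies of the head filtered out); equal return values, no speed claim.

-- ===== PORT A =====
def pvValidDays : List String := ["mon", "tue", "wed", "thu", "fri", "sat", "sun"]

-- day = str(item or "").strip().lower()  (item is a string; '' is the only falsy string)
def pvNormDay (item : String) : String :=
  PySem.Str.lower (PySem.Str.strip (if item == "" then "" else item))

def parseDaysLoop : List String → List String → PySem.Set String → Option (List String) × Option String
  | [], normalized, _ => (some normalized, none)
  | item :: rest, normalized, seen =>
    let day := pvNormDay item
    if day == "" then
      parseDaysLoop rest normalized seen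
    else if !(pvValidDays.contains day) then
      (none, some ("Invalid availability_days value: '" ++ day ++ "'"))
    else if !(PySem.Set.contains seen day) then
      parseDaysLoop rest (normalized ++ [day]) (PySem.Set.add seen day)
    else
      parseDaysLoop rest normalized seen

def parse_days_py (value : Option (List String)) (required : Bool) : Option (List String) × Option String :=
  match value with
  | none => if required then (none, some "availability_days is required") else (none, none)
  | some xs => parseDaysLoop xs [] PySem.Set.empty

-- ===== PORT B =====
-- _nub_validate: validate the head, recurse on the tail with all copies of the head removed.
def nubValidate : List String → Option (List String) × Option String
  | [] => (some [], none)
  | d :: rest =>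
    if !(pvValidDays.contains d) then
      (none, some ("Invalid availability_days value: '" ++ d ++ "'"))
    else
      match nubValidate (rest.filter (fun x => !(x == d))) with
      | (_, some err) => (none, some err)
      | (some tail, none) => (some (d :: tail), none)
      | (none, none) => (none, none)
termination_by l => l.length
decreasing_by
  simp only [List.length_unattach]
  exact Nat.lt_succ_of_le (le_trans (List.length_filter_le _ _) (by simp))

def parse_days_py_alt (value : Option (List String)) (required : Bool) : Option (List String) × Option String :=
  match value with
  | none => if required then (none, some "availability_days is required") else (none, none)
  | some xs => nubValidate ((xs.map pvNormDay).filter (fun d => !(d == "")))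

-- ===== PRECONDITION & SPEC =====
def Spec_parse_days_py (value : Option (List String)) (required : Bool) (out : Option (List String) × Option String) : Prop := out = parse_days_py_alt value required
instance (value : Option (List String)) (required : Bool) (out : Option (List String) × Option String) : Decidable (Spec_parse_days_py value required out) := by unfold Spec_parse_days_py; infer_instance

-- ===== CLAIM (what is proved, stated in full; the proofs are below) =====
def Claim_equal_parse_days_py : Prop := ∀ (value : Option (List String)) (required : Bool), Dom_parse_days_py value required → Spec_parse_days_py value required (parse_days_py value required)

-- ===== LEMMAS AND PROOFS =====

-- Filtering out elements that cannot satisfy p does not change find? p.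
theorem find?_filter_inv (l : List String) (p q : String → Bool)
    (h : ∀ x, p x = true → q x = true) : (l.filter q).find? p = l.find? p := by
  induction l with
  | nil => rfl
  | cons a l ih =>
    by_cases hq : q a = true
    · simp only [List.filter_cons, hq, if_pos]
      cases hp : p a <;> simp [List.find?, hp, ih]
    · have hp : p a = false := by
        cases hpa : p a
        · rfl
        · exact absurd (h a hpa) (by simpa using hq)
      simp [hq, List.find?, hp, ih]

-- Set.update ignores elements already in the set.
theorem update_filter_mem (l : List String) (s : PySem.Set String) (d : String) (hd : d ∈ s) :
    PySem.Set.update s l = PySem.Set.update s (l.filter (fun x => !(x == d))) := by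
  induction l generalizing s with
  | nil => rfl
  | cons a l ih =>
    by_cases ha : a = d
    · subst ha
      have : PySem.Set.add s a = s := by
        simp [PySem.Set.add, PySem.Set.contains, hd]
      simp [PySem.Set.update, List.foldl_cons, this,
        PySem.Set.update] at ih ⊢
      simpa [this] using ih s hd
    · have hcontains : ((a == d) = false) := by simp [ha]
      simp only [List.filter_cons, hcontains, Bool.not_false, if_pos]
      simp only [PySem.Set.update, List.foldl_cons] at ih ⊢
      exact ih (PySem.Set.add s a) (by
        simp [PySem.Set.add]
        split <;> simp [hd])

-- Set.update prefixed with a fresh element commutes with cons.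
theorem update_cons_not_mem (l : List String) (s : List String) (a : String)
    (ha : ∀ x ∈ l, x ≠ a) :
    PySem.Set.update (a :: s) l = a :: PySem.Set.update s l := by
  induction l generalizing s with
  | nil => rfl
  | cons x l ih =>
    have hxa : (x == a) = false := by simp [ha x (by simp)]
    simp only [PySem.Set.update, List.foldl_cons] at ih ⊢
    have hxa' : x ≠ a := by simpa using hxa
    have hc : PySem.Set.add (a :: s) x = a :: PySem.Set.add s x := by
      by_cases hx : x ∈ s <;> simp [PySem.Set.add, PySem.Set.contains, hxa', hx]
    rw [hc]
    exact ih (PySem.Set.add s x) (fun y hy => ha y (by simp [hy]))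

-- ofList splits off its head by filtering the tail.
theorem ofList_cons_filter (d : String) (l : List String) :
    PySem.Set.ofList (d :: l) = d :: PySem.Set.ofList (l.filter (fun x => !(x == d))) := by
  have h1 : PySem.Set.ofList (d :: l) = PySem.Set.update [d] l := rfl
  rw [h1, update_filter_mem l [d] d (by simp)]
  have : PySem.Set.ofList (l.filter (fun x => !(x == d))) =
      PySem.Set.update ([] : List String) (l.filter (fun x => !(x == d))) := rfl
  rw [this]
  exact update_cons_not_mem _ [] d (by
    intro x hx
    have := List.of_mem_filter hx
    simpa using this)

-- B's recursion computes: first invalid day, else ordered dedup (as PySem.Set.ofList).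
theorem nubValidate_eq (l : List String) :
    nubValidate l =
      match l.find? (fun d => !(pvValidDays.contains d)) with
      | some bad => (none, some ("Invalid availability_days value: '" ++ bad ++ "'"))
      | none => (some (PySem.Set.ofList l), none) := by
  induction hn : l.length using Nat.strong_induction_on generalizing l with
  | _ n ih =>
    cases l with
    | nil => rw [nubValidate]; rfl
    | cons d rest =>
      by_cases hv : d ∈ pvValidDays
      · have hinv : pvValidDays.contains d = true := by simpa using hv
        have hrec := ih (rest.filter (fun x => !(x == d))).length
          (by subst hn; exact Nat.lt_succ_of_le (List.length_filter_le _ _))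
          (rest.filter (fun x => !(x == d))) rfl
        rw [nubValidate]
        simp only [hinv, Bool.not_true, Bool.false_eq_true, if_false]
        rw [hrec]
        have hfind : (rest.filter (fun x => !(x == d))).find? (fun d => !(pvValidDays.contains d)) =
            rest.find? (fun d => !(pvValidDays.contains d)) := by
          apply find?_filter_inv
          intro x hx
          simp only [Bool.not_eq_eq_eq_not, Bool.not_true] at hx
          simp only [Bool.not_eq_eq_eq_not]
          cases hxd : x == d
          · rfl
          · simp at hxd; subst hxd; exact absurd hv (by simpa using hx)
        rw [hfind]
        cases hf : rest.find? (fun d => !(pvValidDays.contains d)) with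
        | some bad => simp only [List.find?, hinv, Bool.not_true, hf]
        | none =>
          simp only [List.find?, hinv, Bool.not_true, hf]
          rw [ofList_cons_filter]
      · rw [nubValidate]
        simp [List.find?, hv]

-- A's loop, started with normalized = seen (= s), computes find?-then-update on the filtered days.
set_option maxRecDepth 4096 in
theorem parseDaysLoop_eq (items : List String) (s : PySem.Set String) :
    parseDaysLoop items s s =
      match ((items.map pvNormDay).filter (fun d => !(d == ""))).find?
          (fun d => !(pvValidDays.contains d)) with
      | some bad => (none, some ("Invalid availability_days value: '" ++ bad ++ "'"))
      | none => (some (PySem.Set.update s ((items.map pvNormDay).filter (fun d => !(d == "")))), none) := by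
  induction items generalizing s with
  | nil => simp [parseDaysLoop, PySem.Set.update]
  | cons item rest ih =>
    by_cases h0 : pvNormDay item = ""
    · simp [parseDaysLoop, h0, ih s]
    · by_cases hv : pvNormDay item ∈ pvValidDays
      · by_cases hs : pvNormDay item ∈ s
        · simp [parseDaysLoop, h0, hv, hs, ih s, PySem.Set.update_cons]
        · simp [parseDaysLoop, h0, hv, hs, PySem.Set.update_cons,
            ih (s ++ [pvNormDay item])]
      · simp [parseDaysLoop, h0, hv]

-- ===== VERDICT (by name: the statement is the Claim_ definition above) =====
theorem parse_days_py_spec : Claim_equal_parse_days_py := by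
  intro value required _
  unfold Spec_parse_days_py parse_days_py parse_days_py_alt
  cases value with
  | none => rfl
  | some xs =>
    dsimp only
    rw [show PySem.Set.empty = ([] : PySem.Set String) from rfl,
      parseDaysLoop_eq xs ([] : PySem.Set String), nubValidate_eq]
    rfl
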